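-- pv_equiv track=rewrite | github.com/picota-dt/picota-artifacts | study_cases/europlatano/util/europlatano/datasets_generator.py | _mode_text
-- ===== SOURCE A (Python) =====
-- from collections import Counter
--
-- def _mode_text(values: list[str]) -> str:
--     filtered = [value.strip() for value in values if value and value.strip()]
--     if not filtered:
--         return ""
--     counts = Counter(filtered)
--     max_count = max(counts.values())
--     top_values = sorted(value for value, count in counts.items() if count == max_count)
--     return top_values[0]
-- ===== SOURCE B (Python) =====
-- def _mode_text(values: list[str]) -> str:
--     filtered = [value.strip() for value in values if value and value.strip()]
--     if not filtered:
--         return ""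
--     ordered = sorted(filtered)
--     best = cur = ordered[0]
--     best_len = cur_len = 1
--     for value in ordered[1:]:
--         if value == cur:
--             cur_len += 1
--         else:
--             cur, cur_len = value, 1
--         if cur_len > best_len:
--             best, best_len = cur, cur_len
--     return best
-- ===== Notes on version B (the rewrite author's own statement) =====
-- stated objective: alternative
-- what changed: Replaces Counter + max-of-counts + sort-the-tied-keys with a single ascending sort of the filtered list followed by one linear run-length scan whose strict '>' update keeps the first (hence lexicographically smallest) longest run.
import Mathlib
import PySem

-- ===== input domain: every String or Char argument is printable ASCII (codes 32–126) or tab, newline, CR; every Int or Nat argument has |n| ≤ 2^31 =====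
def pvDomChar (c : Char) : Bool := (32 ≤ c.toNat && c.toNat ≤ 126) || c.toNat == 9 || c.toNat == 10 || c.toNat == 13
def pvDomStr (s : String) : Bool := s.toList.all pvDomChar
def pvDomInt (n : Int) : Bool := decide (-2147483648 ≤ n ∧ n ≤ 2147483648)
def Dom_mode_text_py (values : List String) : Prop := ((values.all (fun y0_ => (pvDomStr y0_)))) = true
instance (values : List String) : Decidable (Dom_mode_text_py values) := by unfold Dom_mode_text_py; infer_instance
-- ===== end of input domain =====

-- B replaces A's Counter + max + sort-of-tied-keys with one sort and a linear run scan (alternative decomposition, same result).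

-- ===== PORT A =====
-- port of: filtered = [value.strip() for value in values if value and value.strip()];
-- if not filtered: return ""; counts = Counter(filtered); max_count = max(counts.values());
-- top_values = sorted(value for value, count in counts.items() if count == max_count); return top_values[0]
def mode_text_py (values : List String) : String :=
  let filtered := (values.filter (fun v => decide (v ≠ "") && decide (PySem.Str.strip v ≠ ""))).map PySem.Str.strip
  if filtered = [] then ""
  else
    let counts := PySem.Dict.counter filtered
    match PySem.List.max? counts.values (fun x => x) with
    | none => ""  -- unreachable: filtered ≠ [] so counts.values ≠ []
    | some maxCount =>
      match PySem.List.sorted ((counts.items.filter (fun p => p.2 == maxCount)).map (fun p => p.1)) (fun x => x) false with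
      | [] => ""  -- unreachable: some key attains maxCount, so top_values[0] never raises
      | top :: _ => top

-- ===== PORT B =====
-- the run scan over ordered[1:], state (best, best_len, cur, cur_len)
def runScan : List String → String → Int → String → Int → String
  | [], best, _, _, _ => best
  | v :: rest, best, bestLen, cur, curLen =>
    let st := if v = cur then (cur, curLen + 1) else (v, (1 : Int))
    if bestLen < st.2 then runScan rest st.1 st.2 st.1 st.2
    else runScan rest best bestLen st.1 st.2

def mode_text_py_alt (values : List String) : String :=
  let filtered := (values.filter (fun v => decide (v ≠ "") && decide (PySem.Str.strip v ≠ ""))).map PySem.Str.strip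
  if filtered = [] then ""
  else
    match PySem.List.sorted filtered (fun x => x) false with
    | [] => ""  -- unreachable: sorted of a nonempty list is nonempty (ordered[0] never raises)
    | h :: t => runScan t h 1 h 1

-- ===== PRECONDITION & SPEC =====
def Spec_mode_text_py (values : List String) (out : String) : Prop := out = mode_text_py_alt values
instance (values : List String) (out : String) : Decidable (Spec_mode_text_py values out) := by unfold Spec_mode_text_py; infer_instance

-- ===== CLAIM (what is proved, stated in full; the proofs are below) =====
def Claim_equal_mode_text_py : Prop := ∀ (values : List String), Dom_mode_text_py values → Spec_mode_text_py values (mode_text_py values)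

-- ===== LEMMAS AND PROOFS =====

-- "m is the most frequent element of s, smallest on ties" — both ports' results satisfy this, and it is unique.
def IsMode (s : List String) (m : String) : Prop :=
  m ∈ s ∧ (∀ y ∈ s, s.count y ≤ s.count m) ∧ (∀ y ∈ s, s.count y = s.count m → m ≤ y)

theorem isMode_unique {s : List String} {m m' : String}
    (h : IsMode s m) (h' : IsMode s m') : m = m' := by
  obtain ⟨hm, hmax, hmin⟩ := h
  obtain ⟨hm', hmax', hmin'⟩ := h'
  have hc : s.count m' = s.count m := Nat.le_antisymm (hmax m' hm') (hmax' m hm)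
  exact le_antisymm (hmin m' hm' hc) (hmin' m hm hc.symm)

theorem counter_values_eq (s : List String) :
    (PySem.Dict.counter s).values = (PySem.Set.ofList s).map (fun k => (s.count k : Int)) := by
  simp [PySem.Dict.values, PySem.Dict.items_counter, List.map_map]

theorem modeA_isMode (s : List String) :
    ∀ maxCount top rest,
      PySem.List.max? (PySem.Dict.counter s).values (fun x => x) = some maxCount →
      PySem.List.sorted (((PySem.Dict.counter s).items.filter (fun p => p.2 == maxCount)).map (fun p => p.1)) (fun x => x) false = top :: rest →
      IsMode s top := by
  intro maxCount top rest hmax htop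
  -- top is a key of the counter with count = maxCount
  have hperm := PySem.List.sorted_perm (((PySem.Dict.counter s).items.filter (fun p => p.2 == maxCount)).map (fun p => p.1)) (fun x => x) false
  rw [htop] at hperm
  have htopmem : top ∈ ((PySem.Dict.counter s).items.filter (fun p => p.2 == maxCount)).map (fun p => p.1) :=
    hperm.mem_iff.1 (by simp)
  obtain ⟨q, hq, hq1⟩ := List.mem_map.1 htopmem
  have hq' := List.mem_filter.1 hq
  rw [PySem.Dict.items_counter] at hq'
  obtain ⟨k, hk, hkq⟩ := List.mem_map.1 hq'.1
  have hks : k ∈ s := (PySem.Set.mem_ofList s k).1 hk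
  have htopk : top = k := by rw [← hq1, ← hkq]
  have hcnt : (s.count top : Int) = maxCount := by
    have := hq'.2
    rw [← hkq] at this
    simp at this
    rw [htopk]; exact this
  refine ⟨htopk ▸ hks, ?_, ?_⟩
  · intro y hy
    have hyv : (s.count y : Int) ∈ (PySem.Dict.counter s).values := by
      rw [counter_values_eq]
      exact List.mem_map.2 ⟨y, (PySem.Set.mem_ofList s y).2 hy, rfl⟩
    have := PySem.List.max?_isMax hmax _ hyv
    simp only at this
    rw [hcnt.symm] at this
    exact_mod_cast this
  · intro y hy hyc
    have hyL : y ∈ ((PySem.Dict.counter s).items.filter (fun p => p.2 == maxCount)).map (fun p => p.1) := by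
      refine List.mem_map.2 ⟨(y, (s.count y : Int)), List.mem_filter.2 ⟨?_, ?_⟩, rfl⟩
      · rw [PySem.Dict.items_counter]
        exact List.mem_map.2 ⟨y, (PySem.Set.mem_ofList s y).2 hy, rfl⟩
      · simp only [beq_iff_eq]
        rw [← hcnt, hyc]
    have := PySem.List.key_head_sorted_le _ _ htop y hyL
    simpa using this

theorem maxA_exists (s : List String) (hs : s ≠ []) :
    ∃ maxCount, PySem.List.max? (PySem.Dict.counter s).values (fun x => x) = some maxCount := by
  cases h : PySem.List.max? (PySem.Dict.counter s).values (fun x => x) with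
  | some m => exact ⟨m, rfl⟩
  | none =>
    rw [PySem.List.max?_eq_none_iff, counter_values_eq, List.map_eq_nil_iff] at h
    obtain ⟨x, hx⟩ := List.exists_mem_of_ne_nil s hs
    have : x ∈ PySem.Set.ofList s := (PySem.Set.mem_ofList s x).2 hx
    rw [h] at this
    simp at this

theorem topA_ne_nil (s : List String) (maxCount : Int)
    (hmax : PySem.List.max? (PySem.Dict.counter s).values (fun x => x) = some maxCount) :
    PySem.List.sorted (((PySem.Dict.counter s).items.filter (fun p => p.2 == maxCount)).map (fun p => p.1)) (fun x => x) false ≠ [] := by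
  rw [Ne, PySem.List.sorted_eq_nil_iff, List.map_eq_nil_iff, List.filter_eq_nil_iff]
  intro hall
  have hmem : maxCount ∈ (PySem.Dict.counter s).values := PySem.List.max?_mem hmax
  rw [PySem.Dict.values] at hmem
  obtain ⟨p, hp, hp2⟩ := List.mem_map.1 hmem
  exact hall p hp (by simp [hp2])

theorem runScan_inv (rest : List String) :
    ∀ (p : List String) (best : String) (bestLen : Int) (cur : String) (curLen : Int),
      (p ++ rest).Pairwise (fun a b => a ≤ b) →
      cur ∈ p → (∀ x ∈ p, x ≤ cur) → curLen = (p.count cur : Int) →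
      best ∈ p → bestLen = (p.count best : Int) →
      (∀ y ∈ p, (p.count y : Int) ≤ bestLen) →
      (∀ y ∈ p, (p.count y : Int) = bestLen → best ≤ y) →
      IsMode (p ++ rest) (runScan rest best bestLen cur curLen) := by
  induction rest with
  | nil =>
    intro p best bestLen cur curLen hpw hcur hcurmax hcl hbest hbl hmax hmin
    simp only [List.append_nil, runScan]
    subst hbl
    refine ⟨hbest, fun y hy => ?_, fun y hy hc => ?_⟩
    · exact_mod_cast hmax y hy
    · exact hmin y hy (by exact_mod_cast hc)
  | cons v rest ih =>
    intro p best bestLen cur curLen hpw hcur hcurmax hcl hbest hbl hmax hmin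
    have hassoc : p ++ v :: rest = (p ++ [v]) ++ rest := by simp
    have hpw' : ((p ++ [v]) ++ rest).Pairwise (fun a b : String => a ≤ b) := by
      rw [← hassoc]; exact hpw
    have hpv : ∀ x ∈ p, x ≤ v := by
      intro x hx
      exact (List.pairwise_append.1 hpw).2.2 x hx v (by simp)
    have hbestpos : (1 : Int) ≤ bestLen := by
      rw [hbl]; exact_mod_cast List.count_pos_iff.2 hbest
    rw [hassoc]
    by_cases hvc : v = cur
    · subst hvc
      have hcount : (((p ++ [v]).count v : Int)) = curLen + 1 := by
        rw [hcl]; push_cast [List.count_append]; simp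
      have hcount' : ∀ y, y ≠ v → (p ++ [v]).count y = p.count y := by
        intro y hy; simp [List.count_append, Ne.symm hy]
      have hmem' : v ∈ p ++ [v] := by simp
      have hmax' : ∀ x ∈ p ++ [v], x ≤ v := by
        intro x hx
        rcases List.mem_append.1 hx with hx | hx
        · exact hcurmax x hx
        · simp at hx; simp [hx]
      have hstep : runScan (v :: rest) best bestLen v curLen
          = if bestLen < curLen + 1 then runScan rest v (curLen + 1) v (curLen + 1)
            else runScan rest best bestLen v (curLen + 1) := by
        simp [runScan]
      rw [hstep]
      by_cases hlt : bestLen < curLen + 1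
      · rw [if_pos hlt]
        refine ih (p ++ [v]) v (curLen + 1) v (curLen + 1) hpw' hmem' hmax' hcount.symm hmem' hcount.symm ?_ ?_
        · intro y hy
          by_cases hyv : y = v
          · subst hyv; rw [hcount]
          · rw [hcount' y hyv]
            have := hmax y (by rcases List.mem_append.1 hy with h | h; exact h; simp at h; exact absurd h hyv)
            omega
        · intro y hy hyc
          by_cases hyv : y = v
          · simp [hyv]
          · exfalso
            rw [hcount' y hyv] at hyc
            have hyp : y ∈ p := by rcases List.mem_append.1 hy with h | h; exact h; simp at h; exact absurd h hyv
            have := hmax y hyp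
            omega
      · rw [if_neg hlt]
        have hbv : best ≠ v := by
          intro h
          subst h
          rw [← hbl] at hcl
          omega
        refine ih (p ++ [v]) best bestLen v (curLen + 1) hpw' hmem' hmax' hcount.symm (by simp [hbest]) ?_ ?_ ?_
        · rw [hcount' best hbv]; exact hbl
        · intro y hy
          by_cases hyv : y = v
          · subst hyv; rw [hcount]; omega
          · rw [hcount' y hyv]
            exact hmax y (by rcases List.mem_append.1 hy with h | h; exact h; simp at h; exact absurd h hyv)
        · intro y hy hyc
          by_cases hyv : y = v
          · subst hyv; exact hcurmax best hbest
          · rw [hcount' y hyv] at hyc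
            exact hmin y (by rcases List.mem_append.1 hy with h | h; exact h; simp at h; exact absurd h hyv) hyc
    · -- new run: v > cur, v not in p
      have hvnotp : v ∉ p := by
        intro hvp
        exact hvc (le_antisymm (hcurmax v hvp) ((List.pairwise_append.1 hpw).2.2 cur hcur v (by simp)))
      have hcount1 : (((p ++ [v]).count v : Int)) = 1 := by
        have : p.count v = 0 := List.count_eq_zero.2 hvnotp
        push_cast [List.count_append, this]; simp
      have hcount' : ∀ y, y ≠ v → (p ++ [v]).count y = p.count y := by
        intro y hy; simp [List.count_append, Ne.symm hy]
      have hmem' : v ∈ p ++ [v] := by simp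
      have hmax' : ∀ x ∈ p ++ [v], x ≤ v := by
        intro x hx
        rcases List.mem_append.1 hx with hx | hx
        · exact hpv x hx
        · simp at hx; simp [hx]
      have hbv : best ≠ v := fun h => hvnotp (h ▸ hbest)
      have hstep : runScan (v :: rest) best bestLen cur curLen
          = if bestLen < 1 then runScan rest v 1 v 1
            else runScan rest best bestLen v 1 := by
        simp [runScan, hvc]
      rw [hstep, if_neg (by omega)]
      refine ih (p ++ [v]) best bestLen v 1 hpw' hmem' hmax' hcount1.symm (by simp [hbest]) ?_ ?_ ?_
      · rw [hcount' best hbv]; exact hbl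
      · intro y hy
        by_cases hyv : y = v
        · subst hyv; rw [hcount1]; omega
        · rw [hcount' y hyv]
          exact hmax y (by rcases List.mem_append.1 hy with h | h; exact h; simp at h; exact absurd h hyv)
      · intro y hy hyc
        by_cases hyv : y = v
        · subst hyv
          rw [hcount1] at hyc
          exact hpv best hbest
        · rw [hcount' y hyv] at hyc
          exact hmin y (by rcases List.mem_append.1 hy with h | h; exact h; simp at h; exact absurd h hyv) hyc

theorem modeB_isMode (s : List String) (hd : String) (tl : List String)
    (hsort : PySem.List.sorted s (fun x => x) false = hd :: tl) :
    IsMode s (runScan tl hd 1 hd 1) := by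
  have hperm := PySem.List.sorted_perm s (fun x => x) false
  rw [hsort] at hperm
  have hpw : List.Pairwise (fun a b : String => a ≤ b) (hd :: tl) := by
    have := PySem.List.sorted_pairwise s (fun x => x)
    rw [hsort] at this
    exact this
  have h1 : IsMode (hd :: tl) (runScan tl hd 1 hd 1) := by
    have := runScan_inv tl [hd] hd 1 hd 1 (by simpa using hpw)
      (by simp) (by simp) (by simp) (by simp) (by simp)
      (by intro y hy; simp_all) (by intro y hy; simp_all)
    simpa using this
  obtain ⟨h1m, h1max, h1min⟩ := h1
  exact ⟨hperm.mem_iff.1 h1m,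
    fun y hy => by
      rw [← hperm.count_eq, ← hperm.count_eq]
      exact h1max y (hperm.mem_iff.2 hy),
    fun y hy hc => by
      refine h1min y (hperm.mem_iff.2 hy) ?_
      rwa [← hperm.count_eq, ← hperm.count_eq] at hc⟩

-- ===== VERDICT (by name: the statement is the Claim_ definition above) =====
theorem mode_text_py_spec : Claim_equal_mode_text_py := by
  intro values _
  unfold Spec_mode_text_py mode_text_py mode_text_py_alt
  set s := (values.filter (fun v => decide (v ≠ "") && decide (PySem.Str.strip v ≠ ""))).map PySem.Str.strip with hsdef
  by_cases hs : s = []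
  · simp [hs]
  · simp only [if_neg hs]
    obtain ⟨maxCount, hmax⟩ := maxA_exists s hs
    have htop := topA_ne_nil s maxCount hmax
    have hsort_ne : PySem.List.sorted s (fun x => x) false ≠ [] := by
      rw [Ne, PySem.List.sorted_eq_nil_iff]; exact hs
    rcases htops : PySem.List.sorted (((PySem.Dict.counter s).items.filter (fun p => p.2 == maxCount)).map (fun p => p.1)) (fun x => x) false with _ | ⟨top, rest⟩
    · exact absurd htops htop
    rcases hsorts : PySem.List.sorted s (fun x => x) false with _ | ⟨hd, tl⟩
    · exact absurd hsorts hsort_ne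
    simp only [hmax, htops]
    exact isMode_unique (modeA_isMode s maxCount top rest hmax htops) (modeB_isMode s hd tl hsorts)
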